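-- pv_equiv track=rewrite | github.com/firebase/firebase-ios-sdk | FirebasePerformance/ProtoSupport/proto_generator.py | objc_strip_extension_registry
-- ===== SOURCE A (Python) =====
-- def objc_strip_extension_registry(lines):
--   """Removes extensionRegistry methods from the classes."""
--   skip = False
--   result = []
--   for line in lines:
--     if '+ (GPBExtensionRegistry*)extensionRegistry {' in line:
--       skip = True
--     if not skip:
--       result.append(line)
--     elif line == '}\n':
--       skip = False
--
--   return result
-- ===== SOURCE B (Python) =====
-- def objc_strip_extension_registry(lines):
--   """Removes extensionRegistry methods from the classes."""
--   result = []
--   it = iter(lines)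
--   for line in it:
--     if '+ (GPBExtensionRegistry*)extensionRegistry {' in line:
--       # consume the block body up to and including its closing '}\n'
--       for inner in it:
--         if inner == '}\n':
--           break
--       continue
--     result.append(line)
--   return result
-- ===== Notes on version B (the rewrite author's own statement) =====
-- stated objective: alternative
-- what changed: Replaces A's skip-flag state machine with explicit block consumption: an iterator is shared between the outer loop and an inner loop that, on seeing the marker, drains lines up to the closing '}\n'.
import Mathlib
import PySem

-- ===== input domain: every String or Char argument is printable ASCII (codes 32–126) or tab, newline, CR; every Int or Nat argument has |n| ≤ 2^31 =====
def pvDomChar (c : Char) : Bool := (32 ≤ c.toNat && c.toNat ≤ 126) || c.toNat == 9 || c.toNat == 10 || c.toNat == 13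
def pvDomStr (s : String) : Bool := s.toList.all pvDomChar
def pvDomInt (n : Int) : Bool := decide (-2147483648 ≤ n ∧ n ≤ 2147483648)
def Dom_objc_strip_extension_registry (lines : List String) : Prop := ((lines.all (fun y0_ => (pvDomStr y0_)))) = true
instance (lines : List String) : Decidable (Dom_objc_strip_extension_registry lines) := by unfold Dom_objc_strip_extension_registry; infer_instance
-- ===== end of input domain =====

-- B replaces A's skip-flag state machine by explicit block consumption (a helper that drains
-- a marker's block up to its closing "}\n"); same cost, alternative decomposition.

-- ===== PORT A =====
def pvMarker : String := "+ (GPBExtensionRegistry*)extensionRegistry {"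

-- literal port of A: fold over the lines carrying the (skip, result) state
def objc_strip_extension_registry (lines : List String) : List String :=
  (lines.foldl
    (fun (st : Bool × List String) line =>
      let skip := if PySem.Str.isIn pvMarker line then true else st.1
      if !skip then (skip, st.2 ++ [line])
      else if line == "}\n" then (false, st.2)
      else (skip, st.2))
    (false, [])).2

-- ===== PORT B =====
-- the inner loop of Source B: drop lines up to and including the first "}\n"
def pvDropBlock : List String → List String
  | [] => []
  | l :: rest => if l == "}\n" then rest else pvDropBlock rest

theorem pvDropBlock_length_le (l : List String) : (pvDropBlock l).length ≤ l.length := by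
  induction l with
  | nil => simp [pvDropBlock]
  | cons x xs ih =>
    simp only [pvDropBlock]
    split
    · simp
    · exact Nat.le_succ_of_le ih

def objc_strip_extension_registry_alt (lines : List String) : List String :=
  match lines with
  | [] => []
  | l :: rest =>
    if PySem.Str.isIn pvMarker l then
      objc_strip_extension_registry_alt (pvDropBlock rest)
    else
      l :: objc_strip_extension_registry_alt rest
termination_by lines.length
decreasing_by
  · exact Nat.lt_succ_of_le (pvDropBlock_length_le rest)
  · simp

-- ===== PRECONDITION & SPEC =====
def Spec_objc_strip_extension_registry (lines : List String) (out : List String) : Prop := out = objc_strip_extension_registry_alt lines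
instance (lines : List String) (out : List String) : Decidable (Spec_objc_strip_extension_registry lines out) := by unfold Spec_objc_strip_extension_registry; infer_instance

-- ===== CLAIM (what is proved, stated in full; the proofs are below) =====
def Claim_equal_objc_strip_extension_registry : Prop := ∀ (lines : List String), Dom_objc_strip_extension_registry lines → Spec_objc_strip_extension_registry lines (objc_strip_extension_registry lines)

-- ===== LEMMAS AND PROOFS =====
-- the step function of A's fold, named for the proofs
def pvStepA (st : Bool × List String) (line : String) : Bool × List String :=
  let skip := if PySem.Str.isIn pvMarker line then true else st.1
  if !skip then (skip, st.2 ++ [line])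
  else if line == "}\n" then (false, st.2)
  else (skip, st.2)

-- "}\n" does not contain the marker (refutes the overlap case in the invariant)
theorem pvMarker_not_in_close : PySem.Chars.isIn pvMarker.toList "}\n".toList = false := by decide

-- the fold invariant: from skip = false it produces B's result, from skip = true it first
-- drains the current block (pvDropBlock) and then produces B's result
theorem pvFold_invariant (lines : List String) : ∀ acc : List String,
    (lines.foldl pvStepA (false, acc)).2 = acc ++ objc_strip_extension_registry_alt lines ∧
    (lines.foldl pvStepA (true, acc)).2 = acc ++ objc_strip_extension_registry_alt (pvDropBlock lines) := by
  induction lines with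
  | nil => intro acc; simp [objc_strip_extension_registry_alt, pvDropBlock]
  | cons l rest ih =>
    intro acc
    constructor
    · by_cases hm : PySem.Chars.isIn pvMarker.toList l.toList = true
      · by_cases hc : l = "}\n"
        · rw [hc, pvMarker_not_in_close] at hm; exact absurd hm (by simp)
        · have hm' : PySem.Str.isIn pvMarker l = true := hm
          have hstep : List.foldl pvStepA (false, acc) (l :: rest)
              = List.foldl pvStepA (true, acc) rest := by
            simp [pvStepA, hm, hc]
          rw [hstep, objc_strip_extension_registry_alt]
          simp only [hm', if_true]
          exact (ih acc).2
      · have hm' : ¬ PySem.Str.isIn pvMarker l = true := hm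
        have hstep : List.foldl pvStepA (false, acc) (l :: rest)
            = List.foldl pvStepA (false, acc ++ [l]) rest := by
          simp [pvStepA, hm]
        rw [hstep, objc_strip_extension_registry_alt]
        simp only [hm']
        rw [(ih (acc ++ [l])).1]
        simp
    · by_cases hc : l = "}\n"
      · have hstep : List.foldl pvStepA (true, acc) (l :: rest)
            = List.foldl pvStepA (false, acc) rest := by
          simp [pvStepA, hc]
        rw [hstep, pvDropBlock]
        simp only [hc, beq_self_eq_true]
        exact (ih acc).1
      · have hstep : List.foldl pvStepA (true, acc) (l :: rest)
            = List.foldl pvStepA (true, acc) rest := by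
          simp [pvStepA, hc]
        rw [hstep, pvDropBlock]
        simp only [hc, beq_iff_eq]
        exact (ih acc).2

-- ===== VERDICT (by name: the statement is the Claim_ definition above) =====
theorem objc_strip_extension_registry_spec : Claim_equal_objc_strip_extension_registry := by
  intro lines _
  unfold Spec_objc_strip_extension_registry
  show (List.foldl pvStepA (false, []) lines).2 = objc_strip_extension_registry_alt lines
  rw [(pvFold_invariant lines []).1]
  simp
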